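-- pv_equiv track=rewrite | github.com/k7kks/TrainScheduling | src/Engineering.py | generate_trip_sequence
-- ===== SOURCE A (Python) =====
-- from typing import List, Dict, Optional
--
-- def generate_trip_sequence(target_large: int, target_small: int, op_rate1: int, op_rate2: int) -> List[int]:
--     """
--     生成车次序列，按开行比例分布大小交路
--
--     Args:
--         target_large: 大交路车次数
--         target_small: 小交路车次数
--         op_rate1: 大交路开行比例
--         op_rate2: 小交路开行比例
--     Returns:
--         车次序列，0表示大交路，1表示小交路
--     """
--     if target_small == 0:
--         return [0] * target_large
--
--     if target_large == 0:
--         return [1] * target_small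
--
--     # 按比例交替排列
--     sequence = []
--     large_count = 0
--     small_count = 0
--
--     total_target = target_large + target_small
--     for i in range(total_target):
--         # 根据比例决定当前车次类型
--         if op_rate1 > 0 and op_rate2 > 0:
--             cycle_pos = i % (op_rate1 + op_rate2)
--             if cycle_pos < op_rate1 and large_count < target_large:
--                 sequence.append(0)
--                 large_count += 1
--             elif small_count < target_small:
--                 sequence.append(1)
--                 small_count += 1
--             elif large_count < target_large:
--                 sequence.append(0)
--                 large_count += 1
--         else:
--             # 处理特殊情况
--             if large_count < target_large:
--                 sequence.append(0)
--                 large_count += 1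
--             else:
--                 sequence.append(1)
--                 small_count += 1
--
--     return sequence
-- ===== SOURCE B (Python) =====
-- def generate_trip_sequence(target_large, target_small, op_rate1, op_rate2):
--     if target_small == 0:
--         return [0] * target_large
--     if target_large == 0:
--         return [1] * target_small
--     if op_rate1 <= 0 or op_rate2 <= 0:
--         return [0] * target_large + [1] * target_small
--     period = op_rate1 + op_rate2
--     sequence = []
--     i = 0
--     large_rem = target_large
--     small_rem = target_small
--     while large_rem > 0 and small_rem > 0:
--         if i % period < op_rate1:
--             sequence.append(0)
--             large_rem -= 1
--         else:
--             sequence.append(1)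
--             small_rem -= 1
--         i += 1
--     return sequence + [0] * large_rem + [1] * small_rem
-- ===== Notes on version B (the rewrite author's own statement) =====
-- stated objective: simpler
-- what changed: Replaces A's fixed-length for-loop with per-iteration rate checks and a three-way fallthrough by an exhaustion while-loop (runs only while both kinds remain) followed by a closed-form constant suffix [0]*large_rem + [1]*small_rem, and hoists the non-positive-rate case out of the loop as [0]*target_large + [1]*target_small.
-- outside the precondition, e.g. on generate_trip_sequence(3, -1, 1, 1): A returns [0, 0], B returns [0, 0, 0]; on generate_trip_sequence(-2, 3, 1, 1): A returns [1], B returns [1, 1, 1]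
import Mathlib
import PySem

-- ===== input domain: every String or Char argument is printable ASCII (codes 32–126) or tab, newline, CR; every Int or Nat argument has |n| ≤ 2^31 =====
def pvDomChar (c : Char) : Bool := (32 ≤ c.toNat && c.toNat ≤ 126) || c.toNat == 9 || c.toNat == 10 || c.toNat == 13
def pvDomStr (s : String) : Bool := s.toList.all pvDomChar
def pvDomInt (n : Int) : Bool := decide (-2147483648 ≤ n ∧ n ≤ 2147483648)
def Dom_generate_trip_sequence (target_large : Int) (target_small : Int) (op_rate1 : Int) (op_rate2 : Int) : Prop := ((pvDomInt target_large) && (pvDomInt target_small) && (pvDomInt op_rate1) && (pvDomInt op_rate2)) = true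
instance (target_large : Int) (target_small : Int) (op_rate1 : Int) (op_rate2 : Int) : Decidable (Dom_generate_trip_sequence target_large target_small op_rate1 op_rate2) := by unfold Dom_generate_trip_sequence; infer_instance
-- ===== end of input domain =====

-- B replaces A's fixed-length for-loop with per-step fallthrough by an exhaustion while-loop plus a
-- closed-form constant suffix (simpler decomposition, same cost).


-- ===== PORT A =====
-- one iteration of A's for-loop body (state: sequence, large_count, small_count)
def gtsA_step (target_large target_small op_rate1 op_rate2 : Int)
    (st : List Int × Int × Int) (i : Int) : List Int × Int × Int :=
  let seq := st.1
  let lc := st.2.1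
  let sc := st.2.2
  if 0 < op_rate1 ∧ 0 < op_rate2 then
    let cycle_pos := PySem.Int.mod i (op_rate1 + op_rate2)
    if cycle_pos < op_rate1 ∧ lc < target_large then (seq ++ [0], lc + 1, sc)
    else if sc < target_small then (seq ++ [1], lc, sc + 1)
    else if lc < target_large then (seq ++ [0], lc + 1, sc)
    else (seq, lc, sc)
  else
    if lc < target_large then (seq ++ [0], lc + 1, sc)
    else (seq ++ [1], lc, sc + 1)

def generate_trip_sequence (target_large : Int) (target_small : Int) (op_rate1 : Int) (op_rate2 : Int) : List Int :=
  if target_small = 0 then List.replicate target_large.toNat 0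
  else if target_large = 0 then List.replicate target_small.toNat 1
  else ((PySem.List.pyRange 0 (target_large + target_small) 1).foldl
          (gtsA_step target_large target_small op_rate1 op_rate2) ([], 0, 0)).1

-- ===== PORT B =====
-- B's while-loop: append while both kinds remain, incrementing i
def gtsB_loop (op_rate1 op_rate2 : Int) (seq : List Int) (i lr sr : Int) : List Int :=
  if h : 0 < lr ∧ 0 < sr then
    if PySem.Int.mod i (op_rate1 + op_rate2) < op_rate1 then
      gtsB_loop op_rate1 op_rate2 (seq ++ [0]) (i + 1) (lr - 1) sr
    else
      gtsB_loop op_rate1 op_rate2 (seq ++ [1]) (i + 1) lr (sr - 1)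
  else seq ++ List.replicate lr.toNat 0 ++ List.replicate sr.toNat 1
termination_by (lr + sr).toNat
decreasing_by all_goals omega

def generate_trip_sequence_alt (target_large : Int) (target_small : Int) (op_rate1 : Int) (op_rate2 : Int) : List Int :=
  if target_small = 0 then List.replicate target_large.toNat 0
  else if target_large = 0 then List.replicate target_small.toNat 1
  else if op_rate1 ≤ 0 ∨ op_rate2 ≤ 0 then
    List.replicate target_large.toNat 0 ++ List.replicate target_small.toNat 1
  else gtsB_loop op_rate1 op_rate2 [] 0 target_large target_small

-- ===== PRECONDITION & SPEC =====
-- Pre_ excludes inputs where exactly one target count is negative (the other strictly positive):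
-- there A's loop silently runs fewer iterations than the remaining positive target, an accident of
-- negative list multiplication / range length, while B emits the full run of the positive side.
def Pre_generate_trip_sequence (target_large : Int) (target_small : Int) (op_rate1 : Int) (op_rate2 : Int) : Prop :=
  target_small = 0 ∨ target_large = 0 ∨ (0 < target_large ∧ 0 < target_small) ∨ (target_large < 0 ∧ target_small < 0)
instance (target_large : Int) (target_small : Int) (op_rate1 : Int) (op_rate2 : Int) : Decidable (Pre_generate_trip_sequence target_large target_small op_rate1 op_rate2) := by unfold Pre_generate_trip_sequence; infer_instance

def pvWitness_generate_trip_sequence : Int × Int × Int × Int := (2, 3, 1, 2)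

def Spec_generate_trip_sequence (target_large : Int) (target_small : Int) (op_rate1 : Int) (op_rate2 : Int) (out : List Int) : Prop := out = generate_trip_sequence_alt target_large target_small op_rate1 op_rate2
instance (target_large : Int) (target_small : Int) (op_rate1 : Int) (op_rate2 : Int) (out : List Int) : Decidable (Spec_generate_trip_sequence target_large target_small op_rate1 op_rate2 out) := by unfold Spec_generate_trip_sequence; infer_instance

-- ===== CLAIM (what is proved, stated in full; the proofs are below) =====
def Claim_equal_generate_trip_sequence : Prop := ∀ (target_large : Int) (target_small : Int) (op_rate1 : Int) (op_rate2 : Int), Dom_generate_trip_sequence target_large target_small op_rate1 op_rate2 → Pre_generate_trip_sequence target_large target_small op_rate1 op_rate2 → Spec_generate_trip_sequence target_large target_small op_rate1 op_rate2 (generate_trip_sequence target_large target_small op_rate1 op_rate2)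

-- ===== LEMMAS AND PROOFS =====

-- Positive-rate phase: A's remaining fold equals B's loop, invariant i = lc + sc.
lemma gtsA_fold_eq_gtsB (L S r1 r2 : Int) (hr1 : 0 < r1) (hr2 : 0 < r2) :
    ∀ (n : Nat) (seq : List Int) (lc sc : Int),
      ((L - lc) + (S - sc)).toNat = n → 0 ≤ lc → lc ≤ L → 0 ≤ sc → sc ≤ S →
      ((PySem.List.pyRange (lc + sc) (L + S) 1).foldl (gtsA_step L S r1 r2) (seq, lc, sc)).1
        = gtsB_loop r1 r2 seq (lc + sc) (L - lc) (S - sc) := by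
  intro n
  induction n with
  | zero =>
    intro seq lc sc hn h0l hlL h0s hsS
    have hlc : lc = L := by omega
    have hsc : sc = S := by omega
    subst hlc; subst hsc
    rw [PySem.List.pyRange_one_eq_nil (by omega)]
    rw [gtsB_loop]
    simp
  | succ n ih =>
    intro seq lc sc hn h0l hlL h0s hsS
    have hlt : lc + sc < L + S := by omega
    rw [PySem.List.pyRange_one_cons hlt]
    by_cases hlr : lc < L
    · by_cases hsr : sc < S
      · -- both remain: one step on each side
        by_cases hc : PySem.Int.mod (lc + sc) (r1 + r2) < r1
        · have hstep : gtsA_step L S r1 r2 (seq, lc, sc) (lc + sc) = (seq ++ [0], lc + 1, sc) := by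
            simp [gtsA_step, hr1, hr2, hc, hlr]
          rw [List.foldl_cons, hstep]
          have := ih (seq ++ [0]) (lc + 1) sc (by omega) (by omega) (by omega) h0s hsS
          rw [show lc + 1 + sc = lc + sc + 1 by ring] at this
          rw [this]
          conv_rhs => rw [gtsB_loop]
          rw [dif_pos (show 0 < L - lc ∧ 0 < S - sc by omega), if_pos hc]
          congr 1 <;> omega
        · have hstep : gtsA_step L S r1 r2 (seq, lc, sc) (lc + sc) = (seq ++ [1], lc, sc + 1) := by
            simp [gtsA_step, hr1, hr2, hc, hsr]
          rw [List.foldl_cons, hstep]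
          have := ih (seq ++ [1]) lc (sc + 1) (by omega) h0l hlL (by omega) (by omega)
          rw [show lc + (sc + 1) = lc + sc + 1 by ring] at this
          rw [this]
          conv_rhs => rw [gtsB_loop]
          rw [dif_pos (show 0 < L - lc ∧ 0 < S - sc by omega), if_neg hc]
          congr 1 <;> omega
      · -- small side exhausted (sc = S): A appends 0, B's loop has stopped
        have hscS : sc = S := by omega
        have hstep : gtsA_step L S r1 r2 (seq, lc, sc) (lc + sc) = (seq ++ [0], lc + 1, sc) := by
          by_cases hc : PySem.Int.mod (lc + sc) (r1 + r2) < r1 <;>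
            simp [gtsA_step, hr1, hr2, hc, hlr, hsr]
        rw [List.foldl_cons, hstep]
        have := ih (seq ++ [0]) (lc + 1) sc (by omega) (by omega) (by omega) h0s hsS
        rw [show lc + 1 + sc = lc + sc + 1 by ring] at this
        rw [this]
        conv_lhs => rw [gtsB_loop]
        conv_rhs => rw [gtsB_loop]
        rw [dif_neg (by omega), dif_neg (by omega)]
        have h1 : (L - lc).toNat = (L - (lc + 1)).toNat + 1 := by omega
        have h2 : S - sc = 0 := by omega
        rw [h1, h2]
        simp [List.replicate_succ, List.append_assoc]
    · -- large side exhausted (lc = L): A appends 1, B's loop has stopped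
      have hsr : sc < S := by omega
      have hstep : gtsA_step L S r1 r2 (seq, lc, sc) (lc + sc) = (seq ++ [1], lc, sc + 1) := by
        by_cases hc : PySem.Int.mod (lc + sc) (r1 + r2) < r1 <;>
          simp [gtsA_step, hr1, hr2, hc, hlr, hsr]
      rw [List.foldl_cons, hstep]
      have := ih (seq ++ [1]) lc (sc + 1) (by omega) h0l hlL (by omega) (by omega)
      rw [show lc + (sc + 1) = lc + sc + 1 by ring] at this
      rw [this]
      conv_lhs => rw [gtsB_loop]
      conv_rhs => rw [gtsB_loop]
      rw [dif_neg (by omega), dif_neg (by omega)]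
      have h1 : (S - sc).toNat = (S - (sc + 1)).toNat + 1 := by omega
      have h2 : L - lc = 0 := by omega
      rw [h1, h2]
      simp [List.replicate_succ, List.append_assoc]

-- Non-positive-rate branch: A's fold emits all 0s then all 1s.
lemma gtsA_fold_eq_replicate (L S r1 r2 : Int) (hr : ¬ (0 < r1 ∧ 0 < r2)) :
    ∀ (n : Nat) (seq : List Int) (lc sc : Int),
      ((L - lc) + (S - sc)).toNat = n → 0 ≤ lc → lc ≤ L → 0 ≤ sc → sc ≤ S →
      ((PySem.List.pyRange (lc + sc) (L + S) 1).foldl (gtsA_step L S r1 r2) (seq, lc, sc)).1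
        = seq ++ List.replicate (L - lc).toNat 0 ++ List.replicate (S - sc).toNat 1 := by
  intro n
  induction n with
  | zero =>
    intro seq lc sc hn h0l hlL h0s hsS
    have hlc : lc = L := by omega
    have hsc : sc = S := by omega
    subst hlc; subst hsc
    rw [PySem.List.pyRange_one_eq_nil (by omega)]
    simp
  | succ n ih =>
    intro seq lc sc hn h0l hlL h0s hsS
    have hlt : lc + sc < L + S := by omega
    rw [PySem.List.pyRange_one_cons hlt]
    by_cases hlr : lc < L
    · have hstep : gtsA_step L S r1 r2 (seq, lc, sc) (lc + sc) = (seq ++ [0], lc + 1, sc) := by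
        simp [gtsA_step, hr, hlr]
      rw [List.foldl_cons, hstep]
      have := ih (seq ++ [0]) (lc + 1) sc (by omega) (by omega) (by omega) h0s hsS
      rw [show lc + 1 + sc = lc + sc + 1 by ring] at this
      rw [this]
      have h1 : (L - lc).toNat = (L - (lc + 1)).toNat + 1 := by omega
      rw [h1]
      simp [List.replicate_succ, List.append_assoc]
    · have hstep : gtsA_step L S r1 r2 (seq, lc, sc) (lc + sc) = (seq ++ [1], lc, sc + 1) := by
        simp [gtsA_step, hr, hlr]
      rw [List.foldl_cons, hstep]
      have hsr : sc < S := by omega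
      have := ih (seq ++ [1]) lc (sc + 1) (by omega) h0l hlL (by omega) (by omega)
      rw [show lc + (sc + 1) = lc + sc + 1 by ring] at this
      rw [this]
      have h1 : (S - sc).toNat = (S - (sc + 1)).toNat + 1 := by omega
      have h2 : L - lc = 0 := by omega
      rw [h1, h2]
      simp [List.replicate_succ, List.append_assoc]

-- ===== VERDICT (by name: the statement is the Claim_ definition above) =====
theorem generate_trip_sequence_spec : Claim_equal_generate_trip_sequence := by
  intro L S r1 r2 _hdom hpre
  unfold Spec_generate_trip_sequence generate_trip_sequence generate_trip_sequence_alt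
  by_cases hS : S = 0
  · simp [hS]
  · by_cases hL : L = 0
    · simp [hS, hL]
    · rw [if_neg hS, if_neg hS, if_neg hL, if_neg hL]
      rcases hpre with h | h | ⟨hLp, hSp⟩ | ⟨hLn, hSn⟩
      · exact absurd h hS
      · exact absurd h hL
      · by_cases hr : 0 < r1 ∧ 0 < r2
        · rw [if_neg (by omega)]
          have := gtsA_fold_eq_gtsB L S r1 r2 hr.1 hr.2 (L + S).toNat [] 0 0
            (by omega) (by omega) (by omega) (by omega) (by omega)
          simpa using this
        · rw [if_pos (by omega)]
          have := gtsA_fold_eq_replicate L S r1 r2 hr (L + S).toNat [] 0 0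
            (by omega) (by omega) (by omega) (by omega) (by omega)
          simpa using this
      · -- both targets negative: both sides are []
        rw [PySem.List.pyRange_one_eq_nil (by omega)]
        have hLt : L.toNat = 0 := by omega
        have hSt : S.toNat = 0 := by omega
        by_cases hr : r1 ≤ 0 ∨ r2 ≤ 0
        · rw [if_pos hr]; simp [hLt, hSt]
        · rw [if_neg hr, gtsB_loop, dif_neg (by omega)]
          simp [hLt, hSt]
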